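-- pv_equiv track=rewrite | github.com/eklemis/E-AFU-Helper-2023 | main_actions/general_actions/photo_tool.py | __findRatio
-- ===== SOURCE A (Python) =====
-- def __findRatio(width_, height_):
--     if width_ % 3 < height_ % 4:
--         new_width = width_ - 1
--         ratio_ = int(new_width / 3)
--         while new_width % 3 != 0:
--             new_width -= 1
--             ratio_ = int(new_width / 3)
--         return ratio_
--     else:
--         new_height = height_ - 1
--         ratio_ = int(new_height / 4)
--         while new_height % 4 != 0:
--             new_height -= 1
--             ratio_ = int(new_height / 4)
--         return ratio_
-- ===== SOURCE B (Python) =====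
-- def __findRatio(width_, height_):
--     # Closed form: the loop in A just lowers the value to the nearest multiple
--     # of 3 (resp. 4) below, i.e. floor division of width_-1 (resp. height_-1).
--     if width_ % 3 < height_ % 4:
--         return (width_ - 1) // 3
--     else:
--         return (height_ - 1) // 4
-- ===== Notes on version B (the rewrite author's own statement) =====
-- stated objective: simpler
-- what changed: Each branch's decrement-until-divisible loop plus float int(x/d) tracking is replaced by a single integer floor division (width_-1)//3 or (height_-1)//4.
import Mathlib
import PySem

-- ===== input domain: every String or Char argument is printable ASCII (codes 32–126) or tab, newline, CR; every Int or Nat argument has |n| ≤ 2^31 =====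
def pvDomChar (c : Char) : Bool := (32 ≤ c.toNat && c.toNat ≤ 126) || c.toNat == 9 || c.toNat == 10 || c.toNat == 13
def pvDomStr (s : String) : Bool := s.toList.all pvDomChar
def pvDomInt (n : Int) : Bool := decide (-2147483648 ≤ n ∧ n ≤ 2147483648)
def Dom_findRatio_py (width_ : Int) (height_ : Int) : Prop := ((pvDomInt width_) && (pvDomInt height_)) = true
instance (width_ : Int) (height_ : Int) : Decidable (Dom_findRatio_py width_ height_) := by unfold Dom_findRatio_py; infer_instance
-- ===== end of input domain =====

-- B replaces A's decrement loops by one floor division per branch (simpler).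

-- ===== PORT A =====
-- 'while new_width % 3 != 0: new_width -= 1; ratio_ = int(new_width / 3)'
-- int(x/3) is Python float division then truncation = PySem.Int.truncdiv (exact for |x| ≤ 2^31).
def findRatio_loop3 (new_width ratio_ : Int) : Int :=
  if PySem.Int.mod new_width 3 ≠ 0 then
    findRatio_loop3 (new_width - 1) (PySem.Int.truncdiv (new_width - 1) 3)
  else ratio_
termination_by (PySem.Int.mod new_width 3).toNat
decreasing_by
  simp only [PySem.Int.mod_eq_emod_of_pos (by omega : (0:Int) < 3)] at *
  omega

def findRatio_loop4 (new_height ratio_ : Int) : Int :=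
  if PySem.Int.mod new_height 4 ≠ 0 then
    findRatio_loop4 (new_height - 1) (PySem.Int.truncdiv (new_height - 1) 4)
  else ratio_
termination_by (PySem.Int.mod new_height 4).toNat
decreasing_by
  simp only [PySem.Int.mod_eq_emod_of_pos (by omega : (0:Int) < 4)] at *
  omega

def findRatio_py (width_ : Int) (height_ : Int) : Int :=
  if PySem.Int.mod width_ 3 < PySem.Int.mod height_ 4 then
    findRatio_loop3 (width_ - 1) (PySem.Int.truncdiv (width_ - 1) 3)
  else
    findRatio_loop4 (height_ - 1) (PySem.Int.truncdiv (height_ - 1) 4)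

-- ===== PORT B =====
def findRatio_py_alt (width_ : Int) (height_ : Int) : Int :=
  if PySem.Int.mod width_ 3 < PySem.Int.mod height_ 4 then
    PySem.Int.floordiv (width_ - 1) 3
  else
    PySem.Int.floordiv (height_ - 1) 4

-- ===== PRECONDITION & SPEC =====
def Spec_findRatio_py (width_ : Int) (height_ : Int) (out : Int) : Prop := out = findRatio_py_alt width_ height_
instance (width_ : Int) (height_ : Int) (out : Int) : Decidable (Spec_findRatio_py width_ height_ out) := by unfold Spec_findRatio_py; infer_instance

-- ===== CLAIM (what is proved, stated in full; the proofs are below) =====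
def Claim_equal_findRatio_py : Prop := ∀ (width_ : Int) (height_ : Int), Dom_findRatio_py width_ height_ → Spec_findRatio_py width_ height_ (findRatio_py width_ height_)

-- ===== LEMMAS AND PROOFS =====

theorem truncdiv_eq_ediv_of_dvd (x d : Int) (h : d ∣ x) :
    PySem.Int.truncdiv x d = x / d := by
  obtain ⟨k, rfl⟩ := h
  simp [PySem.Int.truncdiv, Int.tdiv_eq_ediv_of_dvd ⟨k, rfl⟩]

theorem loop3_eq (nw r : Int) (hr : PySem.Int.mod nw 3 = 0 → r = PySem.Int.floordiv nw 3) :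
    findRatio_loop3 nw r = PySem.Int.floordiv nw 3 := by
  fun_induction findRatio_loop3 nw r with
  | case1 nw r hne ih =>
    rw [ih ?_]
    · rw [PySem.Int.floordiv_eq_ediv_of_pos (by omega), PySem.Int.floordiv_eq_ediv_of_pos (by omega)]
      rw [PySem.Int.mod_eq_emod_of_pos (by omega : (0:Int) < 3)] at hne
      omega
    · intro h0
      rw [PySem.Int.mod_eq_zero_iff_dvd _ _] at h0
      rw [truncdiv_eq_ediv_of_dvd _ _ h0,
          PySem.Int.floordiv_eq_ediv_of_pos (by omega : (0:Int) < 3)]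
  | case2 nw r hmod => exact hr (by simpa using hmod)

theorem loop4_eq (nh r : Int) (hr : PySem.Int.mod nh 4 = 0 → r = PySem.Int.floordiv nh 4) :
    findRatio_loop4 nh r = PySem.Int.floordiv nh 4 := by
  fun_induction findRatio_loop4 nh r with
  | case1 nh r hne ih =>
    rw [ih ?_]
    · rw [PySem.Int.floordiv_eq_ediv_of_pos (by omega), PySem.Int.floordiv_eq_ediv_of_pos (by omega)]
      rw [PySem.Int.mod_eq_emod_of_pos (by omega : (0:Int) < 4)] at hne
      omega
    · intro h0
      rw [PySem.Int.mod_eq_zero_iff_dvd _ _] at h0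
      rw [truncdiv_eq_ediv_of_dvd _ _ h0,
          PySem.Int.floordiv_eq_ediv_of_pos (by omega : (0:Int) < 4)]
  | case2 nh r hmod => exact hr (by simpa using hmod)

-- ===== VERDICT (by name: the statement is the Claim_ definition above) =====
theorem findRatio_py_spec : Claim_equal_findRatio_py := by
  intro w h _
  unfold Spec_findRatio_py findRatio_py findRatio_py_alt
  split
  · exact loop3_eq _ _ fun h0 => by
      rw [PySem.Int.mod_eq_zero_iff_dvd _ _] at h0
      rw [truncdiv_eq_ediv_of_dvd _ _ h0,
          PySem.Int.floordiv_eq_ediv_of_pos (by omega : (0:Int) < 3)]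
  · exact loop4_eq _ _ fun h0 => by
      rw [PySem.Int.mod_eq_zero_iff_dvd _ _] at h0
      rw [truncdiv_eq_ediv_of_dvd _ _ h0,
          PySem.Int.floordiv_eq_ediv_of_pos (by omega : (0:Int) < 4)]
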